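-- pv_equiv track=rewrite | github.com/ashutoshpurushottam/Python-2048 | python2048.py | lines_for_insert
-- ===== SOURCE A (Python) =====
-- UP = 1
--
-- DOWN = 2
--
-- LEFT = 3
--
-- RIGHT = 4
--
-- OFFSETS = {UP: (1, 0),
--            DOWN: (-1, 0),
--            LEFT: (0, 1),
--            RIGHT: (0, -1)}
--
-- def init_tiles(seq, direction):
--     """
--     return a list of indices of tiles whose value will be first passed into the merged function
--     with respect to the direction chosen.
--     """
--     row = len(seq)
--     col = len(seq[0])
--     dir_dict = {UP: [[0, i] for i in range(col)],
--              DOWN: [[row - 1, i] for i in range(col)],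
--              LEFT:[[i, 0] for i in range(row)],
--              RIGHT:[[i, col - 1] for i in range(row)]}
--     return dir_dict[direction]
--
-- def lines_for_insert(seq, direction):
--     """
--     to determine all the lines of values that are to be inserted into the grid
--     """
--     #this is a list of list that contains list of lines
--     lines = []
--     initial = init_tiles(seq, direction)
--     offsets = OFFSETS[direction]
--
--     if direction == UP or direction == DOWN:
--         line_len = len(seq)
--     elif direction == LEFT or direction == RIGHT:
--         line_len = len(seq[0])
--
--     for tile in initial:
--         #this is a list of value of one single individual line
--         line = []
--         for num in range(line_len):
--             row = tile[0] + num* offsets[0]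
--             col = tile[1] + num* offsets[1]
--             line.append(seq[row][col])
--
--         lines.append(line)
--
--     return lines
-- ===== SOURCE B (Python) =====
-- UP = 1
-- DOWN = 2
-- LEFT = 3
-- RIGHT = 4
--
-- def lines_for_insert(seq, direction):
--     """Grid lines in movement order: rows for LEFT/RIGHT, columns for UP/DOWN."""
--     if direction in (LEFT, RIGHT):
--         lines = [list(row) for row in seq]
--     elif direction in (UP, DOWN):
--         lines = [list(col) for col in zip(*seq)]
--     if direction in (DOWN, RIGHT):
--         lines = [line[::-1] for line in lines]
--     return lines
-- ===== Notes on version B (the rewrite author's own statement) =====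
-- stated objective: idiomatic
-- what changed: A walks every line cell-by-cell from a per-direction start tile with offset arithmetic; B takes rows directly for LEFT/RIGHT and transposes with zip(*seq) for UP/DOWN, reversing each line for DOWN/RIGHT. Pre_ restricts to rectangular grids (every row the length of the first), the game's natural domain; on ragged grids A either raises IndexError or silently truncates rows to len(seq[0]).
-- outside the precondition, e.g. on lines_for_insert([[1], [2, 3]], 3): A returns [[1], [2]], B returns [[1], [2, 3]]; on lines_for_insert([[1, 2], [3]], 1): A raises IndexError, B returns [[1, 3]]
import Mathlib
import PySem

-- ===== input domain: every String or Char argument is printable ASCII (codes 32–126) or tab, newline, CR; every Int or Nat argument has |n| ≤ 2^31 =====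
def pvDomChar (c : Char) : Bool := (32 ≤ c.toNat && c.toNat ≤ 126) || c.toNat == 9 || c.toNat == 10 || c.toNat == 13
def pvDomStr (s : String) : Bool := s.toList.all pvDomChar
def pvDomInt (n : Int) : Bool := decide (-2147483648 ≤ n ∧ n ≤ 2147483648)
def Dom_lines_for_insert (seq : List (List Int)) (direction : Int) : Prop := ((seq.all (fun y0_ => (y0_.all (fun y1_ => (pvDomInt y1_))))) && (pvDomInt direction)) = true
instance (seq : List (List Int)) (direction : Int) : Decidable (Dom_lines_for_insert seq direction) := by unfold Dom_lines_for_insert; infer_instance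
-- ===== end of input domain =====

-- B replaces A's offset-walk with direct rows (LEFT/RIGHT) and a zip(*) transpose (UP/DOWN),
-- reversing lines for DOWN/RIGHT; same values on rectangular grids, more idiomatic shape.

-- ===== PORT A =====
-- init_tiles: starting index pair for each line, per direction (dict lookup → if-chain;
-- direction outside {1,2,3,4} is a KeyError in Python, excluded by Pre_).
def init_tiles (seq : List (List Int)) (direction : Int) : List (List Int) :=
  let row : Int := seq.length
  let col : Int := seq.headI.length   -- len(seq[0]); IndexError on [] is excluded by Pre_
  if direction = 1 then (List.range col.toNat).map (fun (i : Nat) => [0, (i : Int)])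
  else if direction = 2 then (List.range col.toNat).map (fun (i : Nat) => [row - 1, (i : Int)])
  else if direction = 3 then (List.range row.toNat).map (fun (i : Nat) => [(i : Int), 0])
  else if direction = 4 then (List.range row.toNat).map (fun (i : Nat) => [(i : Int), col - 1])
  else []

def lines_for_insert (seq : List (List Int)) (direction : Int) : List (List Int) :=
  let initial := init_tiles seq direction
  let offsets : Int × Int :=
    if direction = 1 then (1, 0) else if direction = 2 then (-1, 0)
    else if direction = 3 then (0, 1) else (0, -1)   -- OFFSETS[direction]; KeyError already hit in init_tiles otherwise
  let line_len : Int :=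
    if direction = 1 ∨ direction = 2 then seq.length else (seq.headI.length : Int)
  initial.foldl (fun lines tile =>
    let line := (List.range line_len.toNat).foldl (fun line (num : Nat) =>
      let r := PySem.List.pyGetD tile 0 0 + (num : Int) * offsets.1
      let c := PySem.List.pyGetD tile 1 0 + (num : Int) * offsets.2
      line ++ [PySem.List.pyGetD (PySem.List.pyGetD seq r []) c 0]) []
    lines ++ [line]) []

-- ===== PORT B =====
-- zip(*rows): list of columns, truncated to the shortest row.
def pyTranspose (rows : List (List Int)) : List (List Int) :=
  let n := ((rows.map List.length).min?).getD 0
  (List.range n).map (fun j => rows.map (fun r => r.getD j 0))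

def lines_for_insert_alt (seq : List (List Int)) (direction : Int) : List (List Int) :=
  let lines :=
    if direction = 3 ∨ direction = 4 then seq.map (fun row => row)
    else if direction = 1 ∨ direction = 2 then pyTranspose seq
    else []   -- 'lines' unbound in Python (NameError at return); excluded by Pre_
  if direction = 2 ∨ direction = 4 then lines.map List.reverse else lines

-- ===== PRECONDITION & SPEC =====
-- Natural domain: a nonempty RECTANGULAR grid (the game's board) and a valid direction.
-- Excluded: empty seq (A raises IndexError), direction outside {1,2,3,4} (KeyError), and
-- ragged grids, on which A raises IndexError or silently truncates rows to len(seq[0]).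
def Pre_lines_for_insert (seq : List (List Int)) (direction : Int) : Prop :=
  seq ≠ [] ∧ (direction = 1 ∨ direction = 2 ∨ direction = 3 ∨ direction = 4) ∧
    ∀ r ∈ seq, r.length = seq.headI.length
instance (seq : List (List Int)) (direction : Int) : Decidable (Pre_lines_for_insert seq direction) := by
  unfold Pre_lines_for_insert; infer_instance

def pvWitness_lines_for_insert : List (List Int) × Int := ([[1, 2], [3, 4]], 2)

def Spec_lines_for_insert (seq : List (List Int)) (direction : Int) (out : List (List Int)) : Prop := out = lines_for_insert_alt seq direction
instance (seq : List (List Int)) (direction : Int) (out : List (List Int)) : Decidable (Spec_lines_for_insert seq direction out) := by unfold Spec_lines_for_insert; infer_instance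

-- ===== CLAIM (what is proved, stated in full; the proofs are below) =====
def Claim_equal_lines_for_insert : Prop := ∀ (seq : List (List Int)) (direction : Int), Dom_lines_for_insert seq direction → Pre_lines_for_insert seq direction → Spec_lines_for_insert seq direction (lines_for_insert seq direction)

-- ===== LEMMAS AND PROOFS =====

theorem range_map_getD_self (xs : List Int) :
    (List.range xs.length).map (fun n => xs.getD n 0) = xs := by
  apply List.ext_getElem
  · simp
  · intro i h1 h2
    simp at h1 ⊢
    rw [List.getElem?_eq_getElem (by omega)]; rfl

theorem range_map_rev {α : Type} (f : Nat → α) (c : Nat) :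
    (List.range c).map (fun n => f (c - 1 - n)) = ((List.range c).map f).reverse := by
  apply List.ext_getElem
  · simp
  · intro i h1 h2
    simp at h1 ⊢

theorem range_map_getD_eq_map {α β : Type} (d : α) (xs : List α) (g : α → β) :
    (List.range xs.length).map (fun i => g (xs.getD i d)) = xs.map g := by
  apply List.ext_getElem
  · simp
  · intro i h1 h2
    simp at h1 h2 ⊢
    rw [List.getElem?_eq_getElem (by omega)]; rfl

theorem pyGetD_one_cons {α : Type} (a b : α) (l : List α) (d : α) :
    PySem.List.pyGetD (a :: b :: l) 1 d = b := by
  rw [show ((1 : Int)) = ((1 : Nat) : Int) by rfl, PySem.List.pyGetD_natCast]; rfl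

theorem pyGetD_int_rev {α : Type} (r : List α) (c n : Nat) (hn : n < c) (d : α) :
    PySem.List.pyGetD r ((c : Int) - 1 - (n : Int)) d = r.getD (c - 1 - n) d := by
  rw [show ((c : Int) - 1 - (n : Int)) = ((c - 1 - n : Nat) : Int) by omega,
    PySem.List.pyGetD_natCast]

theorem getD_mem_of_lt (seq : List (List Int)) (i : Nat) (h : i < seq.length) :
    seq.getD i [] ∈ seq := by
  rw [List.getD_eq_getElem seq [] h]
  exact List.getElem_mem h

theorem min_lengths_rect (seq : List (List Int)) (hne : seq ≠ [])
    (hlen : ∀ r ∈ seq, r.length = seq.headI.length) :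
    ((List.map List.length seq).min?).getD 0 = seq.headI.length := by
  have hrep : List.map List.length seq = List.replicate seq.length seq.headI.length := by
    apply List.eq_replicate_iff.mpr
    refine ⟨by simp, ?_⟩
    intro b hb
    simp only [List.mem_map] at hb
    obtain ⟨r, hr, rfl⟩ := hb
    exact hlen r hr
  rw [hrep, List.min?_replicate_of_pos (List.length_pos_iff.mpr hne)]
  rfl

-- ===== VERDICT (by name: the statement is the Claim_ definition above) =====
theorem lines_for_insert_spec : Claim_equal_lines_for_insert := by
  intro seq direction _ hpre
  obtain ⟨hne, hdir, hlen⟩ := hpre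
  unfold Spec_lines_for_insert
  rcases hdir with h | h | h | h <;> subst h
  -- UP (1): A walks each column top-down; B transposes.
  · simp only [lines_for_insert, init_tiles, lines_for_insert_alt, pyTranspose,
      Int.reduceEq, or_self, or_false, if_true, if_false]
    simp only [PySem.List.foldl_append_singleton_eq_map, List.nil_append, List.map_map,
      Int.toNat_natCast, Function.comp_def, mul_zero, mul_one, add_zero, zero_add,
      PySem.List.pyGetD_zero_cons, PySem.List.pyGetD_natCast]
    rw [min_lengths_rect seq hne hlen]
    apply List.map_congr_left
    intro j hj
    simp only [List.mem_range] at hj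
    rw [← range_map_getD_eq_map [] seq (fun r => r.getD j 0)]
    apply List.map_congr_left
    intro x hx
    simp only [pyGetD_one_cons, PySem.List.pyGetD_natCast]
  -- DOWN (2): A walks each column bottom-up; B transposes then reverses each line.
  · simp only [lines_for_insert, init_tiles, lines_for_insert_alt, pyTranspose,
      Int.reduceEq, or_self, or_true, if_true, if_false]
    simp only [PySem.List.foldl_append_singleton_eq_map, List.nil_append, List.map_map,
      Int.toNat_natCast, Function.comp_def, mul_zero, add_zero, mul_neg_one,
      ← sub_eq_add_neg, PySem.List.pyGetD_zero_cons, pyGetD_one_cons, PySem.List.pyGetD_natCast]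
    rw [min_lengths_rect seq hne hlen]
    apply List.map_congr_left
    intro j hj
    simp only [List.mem_range] at hj
    have h1 : List.map
        (fun (n : Nat) => (PySem.List.pyGetD seq ((seq.length : Int) - 1 - (n : Int)) []).getD j 0)
        (List.range seq.length)
        = List.map (fun n => (seq.getD (seq.length - 1 - n) []).getD j 0)
            (List.range seq.length) := by
      apply List.map_congr_left
      intro n hn
      simp only [List.mem_range] at hn
      rw [pyGetD_int_rev seq seq.length n hn []]
    rw [h1, range_map_rev (fun k => (seq.getD k []).getD j 0) seq.length,
      range_map_getD_eq_map [] seq (fun r => r.getD j 0)]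
  -- LEFT (3): A walks each row left-to-right; B takes the rows.
  · simp only [lines_for_insert, init_tiles, lines_for_insert_alt,
      Int.reduceEq, or_self, or_false, if_true, if_false]
    simp only [PySem.List.foldl_append_singleton_eq_map, List.nil_append, List.map_map,
      Int.toNat_natCast, Function.comp_def, mul_zero, mul_one, add_zero, zero_add,
      PySem.List.pyGetD_zero_cons, pyGetD_one_cons, PySem.List.pyGetD_natCast]
    rw [← range_map_getD_eq_map [] seq (fun r => r)]
    apply List.map_congr_left
    intro i hi
    simp only [List.mem_range] at hi
    rw [← hlen _ (getD_mem_of_lt seq i hi)]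
    exact range_map_getD_self _
  -- RIGHT (4): A walks each row right-to-left; B takes the rows and reverses them.
  · simp only [lines_for_insert, init_tiles, lines_for_insert_alt,
      Int.reduceEq, or_self, or_true, if_true, if_false]
    simp only [PySem.List.foldl_append_singleton_eq_map, List.nil_append, List.map_map,
      Int.toNat_natCast, Function.comp_def, mul_zero, add_zero, mul_neg_one,
      ← sub_eq_add_neg, PySem.List.pyGetD_zero_cons, pyGetD_one_cons, PySem.List.pyGetD_natCast]
    rw [← range_map_getD_eq_map [] seq (fun r => r.reverse)]
    apply List.map_congr_left
    intro i hi
    simp only [List.mem_range] at hi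
    have h1 : List.map
        (fun (n : Nat) => PySem.List.pyGetD (seq.getD i []) ((seq.headI.length : Int) - 1 - (n : Int)) 0)
        (List.range seq.headI.length)
        = List.map (fun n => (seq.getD i []).getD (seq.headI.length - 1 - n) 0)
            (List.range seq.headI.length) := by
      apply List.map_congr_left
      intro n hn
      simp only [List.mem_range] at hn
      rw [pyGetD_int_rev _ seq.headI.length n hn 0]
    rw [h1, range_map_rev (fun k => (seq.getD i []).getD k 0) seq.headI.length,
      ← hlen _ (getD_mem_of_lt seq i hi), range_map_getD_self]
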